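-- pv_equiv track=rewrite | github.com/konecty/Konecty | src/scripts/python/graph_generator.py | resolve_field
-- ===== SOURCE A (Python) =====
-- def resolve_field(field_name, available_columns):
--     """Resolve field name, trying description fields for lookups if needed"""
--     # First, check if the field exists directly
--     if field_name in available_columns:
--         return field_name
--
--     # For lookup fields, after flattening, we get fields like _user._id, _user.name, etc.
--     # Check if any field starts with field_name + '.' (indicating it was flattened)
--     matching_fields = [col for col in available_columns if col.startswith(f'{field_name}.')]
--
--     if matching_fields:
--         # Prioritize description fields for display (name, code, label, title)
--         for desc_field in ['name', 'code', 'label', 'title']: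
--             field_with_desc = f'{field_name}.{desc_field}'
--             if field_with_desc in available_columns:
--                 return field_with_desc
--
--         # If no description field found, try _id as fallback
--         field_with_id = f'{field_name}._id'
--         if field_with_id in available_columns:
--             return field_with_id
--
--         # If _id not found, return the first matching field (better than nothing)
--         return matching_fields[0]
--
--     return None
-- ===== SOURCE B (Python) =====
-- RANK = {'name': 0, 'code': 1, 'label': 2, 'title': 3, '_id': 4}
--
-- def resolve_field(field_name, available_columns):
--     """Resolve field name, trying description fields for lookups if needed"""
--     if field_name in available_columns:
--         return field_name
--     prefix = field_name + '.'
--     best = None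
--     best_rank = 6
--     for col in available_columns:
--         if col.startswith(prefix):
--             r = RANK.get(col[len(prefix):], 5)
--             if r < best_rank:
--                 best = col
--                 best_rank = r
--     return best
-- ===== Notes on version B (the rewrite author's own statement) =====
-- stated objective: faster
-- what changed: Replaces the filter comprehension plus up to five separate membership scans with a single table-driven pass that keeps the strictly best-ranked prefix match (rank table name<code<label<title<_id<other).
import Mathlib
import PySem

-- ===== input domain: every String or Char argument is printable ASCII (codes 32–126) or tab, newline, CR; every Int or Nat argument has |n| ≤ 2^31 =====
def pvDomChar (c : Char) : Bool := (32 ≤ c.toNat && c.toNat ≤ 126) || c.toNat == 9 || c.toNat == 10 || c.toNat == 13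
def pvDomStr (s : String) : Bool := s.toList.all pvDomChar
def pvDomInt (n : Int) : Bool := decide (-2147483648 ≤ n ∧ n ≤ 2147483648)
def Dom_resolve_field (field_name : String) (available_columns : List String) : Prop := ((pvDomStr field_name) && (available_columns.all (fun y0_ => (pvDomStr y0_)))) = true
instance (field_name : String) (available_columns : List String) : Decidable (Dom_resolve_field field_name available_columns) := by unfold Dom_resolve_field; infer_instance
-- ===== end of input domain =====

-- B makes one table-driven pass keeping the best-ranked pfx match instead of A's filter plus up to five membership scans (equivalence of return values; neither mutates its arguments).


-- ===== PORT A =====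
-- the 'for desc_field in [...]' loop of A
def pvDescLoop (field_name : String) (available_columns : List String) : List String → Option String
  | [] => none
  | d :: rest =>
      let field_with_desc := field_name ++ "." ++ d
      if available_columns.contains field_with_desc then some field_with_desc
      else pvDescLoop field_name available_columns rest

def resolve_field (field_name : String) (available_columns : List String) : Option String :=
  if available_columns.contains field_name then some field_name
  else
    let matching_fields := available_columns.filter
      (fun col => PySem.Str.startswith col (field_name ++ "."))
    match matching_fields with
    | [] => none
    | m0 :: _ =>
      match pvDescLoop field_name available_columns ["name", "code", "label", "title"] with
      | some r => some r
      | none =>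
        let field_with_id := field_name ++ "._id"
        if available_columns.contains field_with_id then some field_with_id
        else some m0

-- ===== PORT B =====
-- the module-level RANK table of Source B
def pvRankTable : PySem.Dict String Int :=
  PySem.Dict.ofList [("name", 0), ("code", 1), ("label", 2), ("title", 3), ("_id", 4)]

-- the 'for col in available_columns' loop of Source B; state = (best, best_rank)
def pvBestLoop (pfx : String) : List String → Option String × Int → Option String × Int
  | [], st => st
  | col :: rest, st =>
      if PySem.Str.startswith col pfx then
        let r := PySem.Dict.getD pvRankTable (PySem.Str.slice col (some (PySem.Str.len pfx)) none) 5
        if r < st.2 then pvBestLoop pfx rest (some col, r)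
        else pvBestLoop pfx rest st
      else pvBestLoop pfx rest st

def resolve_field_alt (field_name : String) (available_columns : List String) : Option String :=
  if available_columns.contains field_name then some field_name
  else (pvBestLoop (field_name ++ ".") available_columns (none, 6)).1

-- ===== PRECONDITION & SPEC =====
def Spec_resolve_field (field_name : String) (available_columns : List String) (out : Option String) : Prop := out = resolve_field_alt field_name available_columns
instance (field_name : String) (available_columns : List String) (out : Option String) : Decidable (Spec_resolve_field field_name available_columns out) := by unfold Spec_resolve_field; infer_instance

-- ===== CLAIM (what is proved, stated in full; the proofs are below) =====
def Claim_equal_resolve_field : Prop := ∀ (field_name : String) (available_columns : List String), Dom_resolve_field field_name available_columns → Spec_resolve_field field_name available_columns (resolve_field field_name available_columns)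

-- ===== LEMMAS AND PROOFS =====

-- rank of a column relative to a pfx, as B's loop computes it
def pvG (pre c : String) : Int :=
  PySem.Dict.getD pvRankTable (PySem.Str.slice c (some (PySem.Str.len pre)) none) 5

-- B's loop restricted to the matching columns (proof vehicle)
def pvMinLoop (pre : String) : List String → Option String × Int → Option String × Int
  | [], st => st
  | c :: rest, st =>
      if pvG pre c < st.2 then pvMinLoop pre rest (some c, pvG pre c)
      else pvMinLoop pre rest st

theorem pvBestLoop_eq_minLoop (pre : String) (cols : List String) (st : Option String × Int) :
    pvBestLoop pre cols st
      = pvMinLoop pre (cols.filter (fun c => PySem.Str.startswith c pre)) st := by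
  induction cols generalizing st with
  | nil => rfl
  | cons c rest ih =>
      by_cases h : PySem.Chars.startswith c.toList pre.toList = true
      · simp [pvBestLoop, pvMinLoop, List.filter, PySem.Str.startswith_eq, h, pvG,
          PySem.Str.len_eq, ih]
      · simp [pvBestLoop, List.filter, PySem.Str.startswith_eq, h, ih]

theorem pvMinLoop_no_improve (pre : String) (L : List String) (st : Option String × Int)
    (h : ∀ x ∈ L, st.2 ≤ pvG pre x) : pvMinLoop pre L st = st := by
  induction L with
  | nil => rfl
  | cons c rest ih =>
      have hc := h c (by simp)
      simp [pvMinLoop, not_lt.mpr hc]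
      exact ih (fun x hx => h x (by simp [hx]))

theorem pvMinLoop_min (pre : String) (k : Int) :
    ∀ (L : List String) (st : Option String × Int),
    (∃ x ∈ L, pvG pre x = k) → (∀ x ∈ L, k ≤ pvG pre x) → k < st.2 →
    ∃ c, L.find? (fun x => decide (pvG pre x = k)) = some c ∧
         pvMinLoop pre L st = (some c, k) := by
  intro L
  induction L with
  | nil => intro st hex _ _; simp at hex
  | cons c rest ih =>
      intro st hex hmin hlt
      by_cases hc : pvG pre c = k
      · refine ⟨c, by simp [List.find?, hc], ?_⟩
        have : pvMinLoop pre (c :: rest) st = pvMinLoop pre rest (some c, k) := by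
          simp [pvMinLoop, hc, hlt]
        rw [this, pvMinLoop_no_improve pre rest (some c, k)
          (fun x hx => hmin x (by simp [hx]))]
      · have hck : k < pvG pre c := lt_of_le_of_ne (hmin c (by simp)) (fun h => hc h.symm)
        have hex' : ∃ x ∈ rest, pvG pre x = k := by
          rcases hex with ⟨x, hx, hxk⟩
          rcases List.mem_cons.mp hx with rfl | hx'
          · exact absurd hxk hc
          · exact ⟨x, hx', hxk⟩
        have hmin' : ∀ x ∈ rest, k ≤ pvG pre x := fun x hx => hmin x (by simp [hx])
        by_cases hlt' : pvG pre c < st.2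
        · rcases ih (some c, pvG pre c) hex' hmin' hck with ⟨c', h1, h2⟩
          exact ⟨c', by simp [List.find?, hc, h1], by simp [pvMinLoop, hlt', h2]⟩
        · rcases ih st hex' hmin' hlt with ⟨c', h1, h2⟩
          exact ⟨c', by simp [List.find?, hc, h1], by simp [pvMinLoop, hlt', h2]⟩

-- string facts
theorem pv_startswith_append (pre s : String) :
    PySem.Str.startswith (pre ++ s) pre = true := by
  rw [PySem.Str.startswith_eq, PySem.Chars.startswith_iff]
  simp

theorem pv_startswith_decomp {c pre : String} (h : PySem.Str.startswith c pre = true) :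
    ∃ s, c = pre ++ s := by
  rw [PySem.Str.startswith_eq] at h
  rw [PySem.Chars.startswith_iff] at h
  rcases h with ⟨t, ht⟩
  refine ⟨String.ofList t, ?_⟩
  apply String.toList_injective
  simp [← ht]

theorem pv_slice_append (pre s : String) :
    PySem.Str.slice (pre ++ s) (some (PySem.Str.len pre)) none = s := by
  apply String.toList_injective
  simp [PySem.Str.len_eq, PySem.Chars.slice_eq_listSlice, PySem.List.slice_from_natCast]

theorem pvG_append (pre s : String) :
    pvG pre (pre ++ s) = PySem.Dict.getD pvRankTable s 5 := by
  rw [pvG, pv_slice_append]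

-- closed form of the rank table lookup
theorem pvRankGet_eq (s : String) :
    PySem.Dict.getD pvRankTable s 5 =
      (if s = "name" then 0 else if s = "code" then 1 else if s = "label" then 2
       else if s = "title" then 3 else if s = "_id" then 4 else 5) := by
  split_ifs with h1 h2 h3 h4 h5
  · subst h1; decide
  · subst h2; decide
  · subst h3; decide
  · subst h4; decide
  · subst h5; decide
  · simp [pvRankTable, PySem.Dict.ofList, PySem.Dict.update, List.foldl,
      PySem.Dict.getD_insert, h1, h2, h3, h4, h5, PySem.Dict.getD_empty]

-- every matching column is one of the five priority columns or rank-5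
theorem pvG_cases (pre x : String) (hx : PySem.Str.startswith x pre = true) :
    (x = pre ++ "name" ∧ pvG pre x = 0) ∨ (x = pre ++ "code" ∧ pvG pre x = 1) ∨
    (x = pre ++ "label" ∧ pvG pre x = 2) ∨ (x = pre ++ "title" ∧ pvG pre x = 3) ∨
    (x = pre ++ "_id" ∧ pvG pre x = 4) ∨ pvG pre x = 5 := by
  obtain ⟨s, rfl⟩ := pv_startswith_decomp hx
  rw [pvG_append, pvRankGet_eq]
  split_ifs with h1 h2 h3 h4 h5 <;> simp_all

theorem pvMinLoop_eq_of (pre sub : String) (M : List String) (k : Int)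
    (hmem : pre ++ sub ∈ M) (hself : pvG pre (pre ++ sub) = k) (hk : k < 6)
    (hlow : ∀ x ∈ M, k ≤ pvG pre x)
    (huniq : ∀ x ∈ M, pvG pre x = k → x = pre ++ sub) :
    pvMinLoop pre M (none, 6) = (some (pre ++ sub), k) := by
  obtain ⟨c, hfind, hres⟩ :=
    pvMinLoop_min pre k M (none, 6) ⟨_, hmem, hself⟩ hlow hk
  have hc1 := List.find?_some hfind
  have hc2 := List.mem_of_find?_eq_some hfind
  simp only [decide_eq_true_eq] at hc1
  rw [hres, huniq c hc2 hc1]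

theorem pv_main (fn : String) (cols : List String) :
    resolve_field fn cols = resolve_field_alt fn cols := by
  by_cases hc : cols.contains fn = true
  · simp only [resolve_field, resolve_field_alt, if_pos hc]
  · simp only [resolve_field, resolve_field_alt, if_neg hc]
    rw [pvBestLoop_eq_minLoop]
    cases hM : cols.filter (fun col => PySem.Str.startswith col (fn ++ ".")) with
    | nil => simp [pvMinLoop]
    | cons m0 t =>
      have hmm : ∀ x, x ∈ m0 :: t ↔ x ∈ cols ∧ PySem.Str.startswith x (fn ++ ".") = true := by
        intro x; rw [← hM]; exact List.mem_filter
      have hid : fn ++ "._id" = (fn ++ ".") ++ "_id" := by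
        rw [String.append_assoc]; congr 1
      by_cases h0 : (fn ++ ".") ++ "name" ∈ cols
      · -- priority field "name" is the first one present
        have hlow : ∀ x ∈ m0 :: t, (0 : Int) ≤ pvG (fn ++ ".") x := by
          intro x hx
          have hxc := ((hmm x).mp hx).1
          rcases pvG_cases (fn ++ ".") x ((hmm x).mp hx).2 with
            ⟨rfl, h⟩ | ⟨rfl, h⟩ | ⟨rfl, h⟩ | ⟨rfl, h⟩ | ⟨rfl, h⟩ | h <;>
            first | omega
        have huniq : ∀ x ∈ m0 :: t, pvG (fn ++ ".") x = 0 → x = (fn ++ ".") ++ "name" := by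
          intro x hx hgx
          rcases pvG_cases (fn ++ ".") x ((hmm x).mp hx).2 with
            ⟨rfl, h⟩ | ⟨rfl, h⟩ | ⟨rfl, h⟩ | ⟨rfl, h⟩ | ⟨rfl, h⟩ | h <;>
            first | rfl | omega
        rw [pvMinLoop_eq_of (fn ++ ".") "name" (m0 :: t) 0
          ((hmm _).mpr ⟨h0, pv_startswith_append _ _⟩)
          (by rw [pvG_append]; decide) (by norm_num) hlow huniq]
        simp [pvDescLoop, h0]
      by_cases h1 : (fn ++ ".") ++ "code" ∈ cols
      · -- priority field "code" is the first one present
        have hlow : ∀ x ∈ m0 :: t, (1 : Int) ≤ pvG (fn ++ ".") x := by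
          intro x hx
          have hxc := ((hmm x).mp hx).1
          rcases pvG_cases (fn ++ ".") x ((hmm x).mp hx).2 with
            ⟨rfl, h⟩ | ⟨rfl, h⟩ | ⟨rfl, h⟩ | ⟨rfl, h⟩ | ⟨rfl, h⟩ | h <;>
            first | omega | exact absurd hxc h0
        have huniq : ∀ x ∈ m0 :: t, pvG (fn ++ ".") x = 1 → x = (fn ++ ".") ++ "code" := by
          intro x hx hgx
          rcases pvG_cases (fn ++ ".") x ((hmm x).mp hx).2 with
            ⟨rfl, h⟩ | ⟨rfl, h⟩ | ⟨rfl, h⟩ | ⟨rfl, h⟩ | ⟨rfl, h⟩ | h <;>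
            first | rfl | omega
        rw [pvMinLoop_eq_of (fn ++ ".") "code" (m0 :: t) 1
          ((hmm _).mpr ⟨h1, pv_startswith_append _ _⟩)
          (by rw [pvG_append]; decide) (by norm_num) hlow huniq]
        simp [pvDescLoop, h0, h1]
      by_cases h2 : (fn ++ ".") ++ "label" ∈ cols
      · -- priority field "label" is the first one present
        have hlow : ∀ x ∈ m0 :: t, (2 : Int) ≤ pvG (fn ++ ".") x := by
          intro x hx
          have hxc := ((hmm x).mp hx).1
          rcases pvG_cases (fn ++ ".") x ((hmm x).mp hx).2 with
            ⟨rfl, h⟩ | ⟨rfl, h⟩ | ⟨rfl, h⟩ | ⟨rfl, h⟩ | ⟨rfl, h⟩ | h <;>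
            first | omega | exact absurd hxc h0 | exact absurd hxc h1
        have huniq : ∀ x ∈ m0 :: t, pvG (fn ++ ".") x = 2 → x = (fn ++ ".") ++ "label" := by
          intro x hx hgx
          rcases pvG_cases (fn ++ ".") x ((hmm x).mp hx).2 with
            ⟨rfl, h⟩ | ⟨rfl, h⟩ | ⟨rfl, h⟩ | ⟨rfl, h⟩ | ⟨rfl, h⟩ | h <;>
            first | rfl | omega
        rw [pvMinLoop_eq_of (fn ++ ".") "label" (m0 :: t) 2
          ((hmm _).mpr ⟨h2, pv_startswith_append _ _⟩)
          (by rw [pvG_append]; decide) (by norm_num) hlow huniq]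
        simp [pvDescLoop, h0, h1, h2]
      by_cases h3 : (fn ++ ".") ++ "title" ∈ cols
      · -- priority field "title" is the first one present
        have hlow : ∀ x ∈ m0 :: t, (3 : Int) ≤ pvG (fn ++ ".") x := by
          intro x hx
          have hxc := ((hmm x).mp hx).1
          rcases pvG_cases (fn ++ ".") x ((hmm x).mp hx).2 with
            ⟨rfl, h⟩ | ⟨rfl, h⟩ | ⟨rfl, h⟩ | ⟨rfl, h⟩ | ⟨rfl, h⟩ | h <;>
            first | omega | exact absurd hxc h0 | exact absurd hxc h1 | exact absurd hxc h2
        have huniq : ∀ x ∈ m0 :: t, pvG (fn ++ ".") x = 3 → x = (fn ++ ".") ++ "title" := by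
          intro x hx hgx
          rcases pvG_cases (fn ++ ".") x ((hmm x).mp hx).2 with
            ⟨rfl, h⟩ | ⟨rfl, h⟩ | ⟨rfl, h⟩ | ⟨rfl, h⟩ | ⟨rfl, h⟩ | h <;>
            first | rfl | omega
        rw [pvMinLoop_eq_of (fn ++ ".") "title" (m0 :: t) 3
          ((hmm _).mpr ⟨h3, pv_startswith_append _ _⟩)
          (by rw [pvG_append]; decide) (by norm_num) hlow huniq]
        simp [pvDescLoop, h0, h1, h2, h3]
      by_cases h4 : (fn ++ ".") ++ "_id" ∈ cols
      · -- priority field "_id" is the first one present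
        have hlow : ∀ x ∈ m0 :: t, (4 : Int) ≤ pvG (fn ++ ".") x := by
          intro x hx
          have hxc := ((hmm x).mp hx).1
          rcases pvG_cases (fn ++ ".") x ((hmm x).mp hx).2 with
            ⟨rfl, h⟩ | ⟨rfl, h⟩ | ⟨rfl, h⟩ | ⟨rfl, h⟩ | ⟨rfl, h⟩ | h <;>
            first | omega | exact absurd hxc h0 | exact absurd hxc h1 | exact absurd hxc h2 | exact absurd hxc h3
        have huniq : ∀ x ∈ m0 :: t, pvG (fn ++ ".") x = 4 → x = (fn ++ ".") ++ "_id" := by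
          intro x hx hgx
          rcases pvG_cases (fn ++ ".") x ((hmm x).mp hx).2 with
            ⟨rfl, h⟩ | ⟨rfl, h⟩ | ⟨rfl, h⟩ | ⟨rfl, h⟩ | ⟨rfl, h⟩ | h <;>
            first | rfl | omega
        rw [pvMinLoop_eq_of (fn ++ ".") "_id" (m0 :: t) 4
          ((hmm _).mpr ⟨h4, pv_startswith_append _ _⟩)
          (by rw [pvG_append]; decide) (by norm_num) hlow huniq]
        simp [pvDescLoop, hid, h0, h1, h2, h3, h4]
      -- no priority subfield present: every matching column has rank 5, first wins
      have hG : ∀ x ∈ m0 :: t, pvG (fn ++ ".") x = 5 := by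
        intro x hx
        have hxc := ((hmm x).mp hx).1
        rcases pvG_cases (fn ++ ".") x ((hmm x).mp hx).2 with
          ⟨rfl, h⟩ | ⟨rfl, h⟩ | ⟨rfl, h⟩ | ⟨rfl, h⟩ | ⟨rfl, h⟩ | h <;>
          first | exact h | exact absurd hxc h0 | exact absurd hxc h1 |
            exact absurd hxc h2 | exact absurd hxc h3 |
            exact absurd hxc h4
      have hm0 : pvG (fn ++ ".") m0 = 5 := hG m0 (by simp)
      obtain ⟨c, hfind, hres⟩ := pvMinLoop_min (fn ++ ".") 5 (m0 :: t) (none, 6)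
        ⟨m0, by simp, hm0⟩ (fun x hx => le_of_eq (hG x hx).symm) (by norm_num)
      rw [List.find?_cons_of_pos (by simp [hm0])] at hfind
      injection hfind with hfind
      rw [hres, ← hfind]
      simp [pvDescLoop, hid, h0, h1, h2, h3, h4]

-- ===== VERDICT (by name: the statement is the Claim_ definition above) =====
theorem resolve_field_spec : Claim_equal_resolve_field := by
  intro fn cols _
  unfold Spec_resolve_field
  exact pv_main fn cols
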